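-- pv_equiv track=rewrite | github.com/felixfontein/ansible-tools | plugins/plugin_utils/public_suffix.py | split_into_labels
-- ===== SOURCE A (Python) =====
-- class InvalidDomainName(Exception):
--     '''
--     The provided domain name is not valid.
--     '''
--     pass
--
-- def split_into_labels(domain):
--     '''
--     Split domain name to a list of labels. Start with the top-most label.
--
--     Returns a list of labels and a tail, which is either ``''`` or ``'.'``.
--     Raises ``InvalidDomainName`` if the domain name is not valid.
--     '''
--     result = []
--     index = len(domain)
--     tail = ''
--     if domain.endswith('.'):
--         index -= 1
--         tail = '.'
--     if index > 0:
--         while index >= 0: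
--             next_index = domain.rfind('.', 0, index)
--             label = domain[next_index + 1:index]
--             if label == '' or label[0] == '-' or label[-1] == '-' or len(label) > 63:
--                 raise InvalidDomainName(domain)
--             result.append(label)
--             index = next_index
--     return result, tail
-- ===== SOURCE B (Python) =====
-- class InvalidDomainName(Exception):
--     '''
--     The provided domain name is not valid.
--     '''
--     pass
--
--
-- def split_into_labels(domain):
--     '''
--     Split domain name to a list of labels. Start with the top-most label.
--
--     Returns a list of labels and a tail, which is either ``''`` or ``'.'``.
--     Raises ``InvalidDomainName`` if the domain name is not valid.
--     '''
--     if domain.endswith('.'):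
--         body, tail = domain[:-1], '.'
--     else:
--         body, tail = domain, ''
--     if body == '':
--         return [], tail
--     result = []
--     for label in reversed(body.split('.')):
--         if label == '' or label[0] == '-' or label[-1] == '-' or len(label) > 63:
--             raise InvalidDomainName(domain)
--         result.append(label)
--     return result, tail
-- ===== Notes on version B (the rewrite author's own statement) =====
-- stated objective: simpler
-- what changed: Replaced the backward rfind scan with manual index bookkeeping by stripping the trailing dot into tail, calling body.split('.') once, and validating the segments in reversed order.
import Mathlib
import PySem

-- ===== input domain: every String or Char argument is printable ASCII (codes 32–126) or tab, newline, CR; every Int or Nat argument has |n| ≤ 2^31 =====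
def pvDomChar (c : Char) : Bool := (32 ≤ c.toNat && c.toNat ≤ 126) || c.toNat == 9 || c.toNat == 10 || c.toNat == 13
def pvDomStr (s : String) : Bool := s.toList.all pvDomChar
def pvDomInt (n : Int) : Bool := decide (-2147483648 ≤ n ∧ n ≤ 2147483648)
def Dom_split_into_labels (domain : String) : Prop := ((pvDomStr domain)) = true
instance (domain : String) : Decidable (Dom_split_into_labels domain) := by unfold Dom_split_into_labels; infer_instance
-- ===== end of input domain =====

-- B replaces A's backward rfind scan with manual index tracking by strip-tail + split('.') +
-- one validation pass over the reversed segments (objective: simpler). Python A/B raise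
-- InvalidDomainName on invalid labels; those inputs are excluded by Pre_ (the ports return
-- ([], tail) there, modelling the raise).

-- ===== PORT A =====
-- the while loop of A; fuel only makes the recursion total (the loop always terminates),
-- Option models the raise
def pvLoopA (cs : List Char) (index : Int) (acc : List (List Char)) (fuel : Nat) :
    Option (List (List Char)) :=
  match fuel with
  | 0 => none
  | fuel + 1 =>
    if 0 ≤ index then
      let next := PySem.Chars.rfindFrom cs ['.'] 0 (some index)
      let label := PySem.List.slice cs (some (next + 1)) (some index)
      if label = [] ∨ PySem.List.pyGet? label 0 = some '-' ∨
          PySem.List.pyGet? label (-1) = some '-' ∨ 63 < label.length then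
        none
      else pvLoopA cs next (acc ++ [label]) fuel
    else some acc

def split_into_labels (domain : String) : List String × String :=
  let cs := domain.toList
  let index : Int := if PySem.Str.endswith domain "." then (cs.length : Int) - 1 else (cs.length : Int)
  let tail : String := if PySem.Str.endswith domain "." then "." else ""
  if 0 < index then
    match pvLoopA cs index [] (cs.length + 2) with
    | some r => (r.map String.ofList, tail)
    | none => ([], tail)      -- raise InvalidDomainName(domain): outside Pre_
  else ([], tail)

-- ===== PORT B =====
-- 'for label in reversed(body.split('.')): validate; result.append(label)'
def pvCheckRev (ls : List (List Char)) (acc : List (List Char)) : Option (List (List Char)) :=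
  match ls with
  | [] => some acc
  | l :: rest =>
    if l = [] ∨ PySem.List.pyGet? l 0 = some '-' ∨
        PySem.List.pyGet? l (-1) = some '-' ∨ 63 < l.length then
      none
    else pvCheckRev rest (acc ++ [l])

def split_into_labels_alt (domain : String) : List String × String :=
  let cs := domain.toList
  let body : List Char := if PySem.Str.endswith domain "." then PySem.List.slice cs none (some (-1)) else cs
  let tail : String := if PySem.Str.endswith domain "." then "." else ""
  if body = [] then ([], tail)
  else
    match pvCheckRev ((PySem.Chars.splitOn body ['.']).reverse) [] with
    | some r => (r.map String.ofList, tail)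
    | none => ([], tail)      -- raise InvalidDomainName(domain): outside Pre_

-- ===== PRECONDITION & SPEC =====
-- Python's invalidity test for one label, as a Boolean
def pvBad (l : List Char) : Bool :=
  l.isEmpty || (PySem.List.pyGet? l 0 == some '-') || (PySem.List.pyGet? l (-1) == some '-')
    || decide (63 < l.length)

-- Pre_ excludes exactly the inputs on which Python A raises InvalidDomainName:
-- some label of the domain body is empty, starts or ends with '-', or is longer than 63.
def Pre_split_into_labels (domain : String) : Prop :=
  let body := if PySem.Str.endswith domain "." then domain.toList.dropLast else domain.toList
  body = [] ∨ ∀ l ∈ PySem.Chars.splitOn body ['.'], pvBad l = false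
instance (domain : String) : Decidable (Pre_split_into_labels domain) := by
  unfold Pre_split_into_labels; infer_instance

def pvWitness_split_into_labels : String := "www.example.com."

def Spec_split_into_labels (domain : String) (out : List String × String) : Prop :=
  out = split_into_labels_alt domain
instance (domain : String) (out : List String × String) : Decidable (Spec_split_into_labels domain out) := by
  unfold Spec_split_into_labels; infer_instance

-- ===== CLAIM (what is proved, stated in full; the proofs are below) =====
def Claim_equal_split_into_labels : Prop :=
  ∀ (domain : String), Dom_split_into_labels domain → Pre_split_into_labels domain →
    Spec_split_into_labels domain (split_into_labels domain)

-- ===== LEMMAS AND PROOFS =====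

-- reference splitter used only in the proofs
def pvMySplit (pre l : List Char) : List (List Char) :=
  match l with
  | [] => [pre]
  | c :: rest => if c = '.' then pre :: pvMySplit [] rest else pvMySplit (pre ++ [c]) rest

lemma pvBad_iff (l : List Char) :
    (l = [] ∨ PySem.List.pyGet? l 0 = some '-' ∨ PySem.List.pyGet? l (-1) = some '-' ∨
      63 < l.length) ↔ pvBad l = true := by
  simp [pvBad, List.isEmpty_iff, or_assoc]

lemma pvDotPrefix (l : List Char) : ['.'].isPrefixOf l = true ↔ l[0]? = some '.' := by
  cases l with
  | nil => simp [List.isPrefixOf]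
  | cons c t => simp [List.isPrefixOf]; exact eq_comm

lemma pvGoZero (s sub : List Char) :
    PySem.Chars.rfind.go s sub 0 = if sub.isPrefixOf s then 0 else -1 := rfl

lemma pvGoSucc (s sub : List Char) (j : Nat) :
    PySem.Chars.rfind.go s sub (j + 1) =
      if sub.isPrefixOf (s.drop (j + 1)) then ((j : Int) + 1) else PySem.Chars.rfind.go s sub j := by
  rfl

lemma pvGoNone (s : List Char) (j : Nat) (h : ∀ i : Nat, i ≤ j → s[i]? ≠ some '.') :
    PySem.Chars.rfind.go s ['.'] j = -1 := by
  induction j with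
  | zero =>
    rw [pvGoZero, if_neg]
    intro hp
    exact h 0 le_rfl ((pvDotPrefix s).1 hp)
  | succ j ih =>
    rw [pvGoSucc, if_neg]
    · exact ih (fun i hi => h i (Nat.le_succ_of_le hi))
    · intro hp
      have hx := (pvDotPrefix (s.drop (j + 1))).1 hp
      rw [List.getElem?_drop] at hx
      exact h (j + 1) le_rfl (by simpa using hx)

lemma pvGoFound (s : List Char) (k : Nat) (hk : s[k]? = some '.') :
    ∀ j, k ≤ j → (∀ i : Nat, k < i → i ≤ j → s[i]? ≠ some '.') →
      PySem.Chars.rfind.go s ['.'] j = k := by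
  intro j
  induction j with
  | zero =>
    intro hkj _
    have hk0 : k = 0 := Nat.le_zero.mp hkj
    subst hk0
    rw [pvGoZero, if_pos ((pvDotPrefix s).2 hk)]
    simp
  | succ j ih =>
    intro hkj hno
    by_cases hkj' : k = j + 1
    · subst hkj'
      have hpref : ['.'].isPrefixOf (s.drop (j + 1)) = true := by
        apply (pvDotPrefix _).2
        rw [List.getElem?_drop]
        simpa using hk
      rw [pvGoSucc, if_pos hpref]
      omega
    · have hkle : k ≤ j := by omega
      rw [pvGoSucc, if_neg]
      · exact ih hkle (fun i h1 h2 => hno i h1 (Nat.le_succ_of_le h2))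
      · intro hp
        have hx := (pvDotPrefix (s.drop (j + 1))).1 hp
        rw [List.getElem?_drop] at hx
        exact hno (j + 1) (by omega) le_rfl (by simpa using hx)

lemma pvRfindNo (p : List Char) (h : '.' ∉ p) : PySem.Chars.rfind p ['.'] = -1 := by
  apply pvGoNone
  intro i _ hi
  exact h (List.mem_of_getElem? hi)

lemma pvRfindLast (xs ys : List Char) (h : '.' ∉ ys) :
    PySem.Chars.rfind (xs ++ '.' :: ys) ['.'] = xs.length := by
  have hk : (xs ++ '.' :: ys)[xs.length]? = some '.' := by
    rw [List.getElem?_append_right le_rfl]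
    simp
  apply pvGoFound _ _ hk
  · simp
  · intro i h1 h2 hc
    rw [List.getElem?_append_right (le_of_lt h1)] at hc
    obtain ⟨m, hm⟩ : ∃ m, i - xs.length = m + 1 := ⟨i - xs.length - 1, by omega⟩
    rw [hm, List.getElem?_cons_succ] at hc
    exact h (List.mem_of_getElem? hc)

lemma pvRfindFrom (cs p : List Char) (hp : p <+: cs) :
    PySem.Chars.rfindFrom cs ['.'] 0 (some (p.length : Int)) = PySem.Chars.rfind p ['.'] := by
  have hle : p.length ≤ cs.length := hp.length_le
  have htake : cs.take p.length = p := (List.prefix_iff_eq_take.mp hp).symm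
  have h1 : ¬((cs.length : Int) < (p.length : Int)) := by omega
  have h2 : ¬((p.length : Int) < 0) := by omega
  simp only [PySem.Chars.rfindFrom, h1, if_false, h2, lt_irrefl, Int.toNat_natCast,
    htake, zero_add]
  by_cases hr : PySem.Chars.rfind p ['.'] = -1 <;> simp [hr]

-- the splitOn worker, characterised step by step
lemma pvSplitGoNil (fuel : Nat) (cur : List Char) (acc : List (List Char)) :
    PySem.Chars.splitOn.go ['.'] fuel [] cur acc = (cur.reverse :: acc).reverse := by
  cases fuel <;> simp [PySem.Chars.splitOn.go]

lemma pvSplitGoCons (fuel : Nat) (c : Char) (rest cur : List Char) (acc : List (List Char)) :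
    PySem.Chars.splitOn.go ['.'] (fuel + 1) (c :: rest) cur acc =
      if c = '.' then PySem.Chars.splitOn.go ['.'] fuel rest [] (cur.reverse :: acc)
      else PySem.Chars.splitOn.go ['.'] fuel rest (c :: cur) acc := by
  by_cases hc : c = '.'
  · subst hc
    rw [if_pos rfl]
    have hpref : List.isPrefixOf ['.'] ('.' :: rest) = true := by simp [List.isPrefixOf]
    simp [PySem.Chars.splitOn.go, hpref]
  · rw [if_neg hc]
    have hc' : ¬('.' = c) := fun h => hc h.symm
    have hpref : List.isPrefixOf ['.'] (c :: rest) = false := by simp [List.isPrefixOf, hc']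
    simp [PySem.Chars.splitOn.go, hpref]

lemma pvSplitGo (l : List Char) :
    ∀ (fuel : Nat) (pre : List Char) (acc : List (List Char)), l.length ≤ fuel →
      PySem.Chars.splitOn.go ['.'] fuel l pre.reverse acc = acc.reverse ++ pvMySplit pre l := by
  induction l with
  | nil =>
    intro fuel pre acc _
    rw [pvSplitGoNil]
    simp [pvMySplit]
  | cons c rest ih =>
    intro fuel pre acc hf
    obtain ⟨f, rfl⟩ : ∃ f, fuel = f + 1 := ⟨fuel - 1, by simp at hf; omega⟩
    rw [pvSplitGoCons]
    by_cases hc : c = '.'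
    · rw [if_pos hc]
      have hx := ih f [] (pre.reverse.reverse :: acc) (by simp at hf; omega)
      simp only [List.reverse_nil] at hx
      rw [hx]
      simp [pvMySplit, hc]
    · rw [if_neg hc]
      have hy : c :: pre.reverse = (pre ++ [c]).reverse := by simp
      rw [hy, ih f (pre ++ [c]) acc (by simp at hf; omega)]
      simp [pvMySplit, hc]

lemma pvSplitOnEq (l : List Char) : PySem.Chars.splitOn l ['.'] = pvMySplit [] l := by
  have hx := pvSplitGo l (l.length + 1) [] [] (by omega)
  simpa [PySem.Chars.splitOn] using hx

lemma pvMySplitNoDot (pre l : List Char) (h : '.' ∉ l) : pvMySplit pre l = [pre ++ l] := by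
  induction l generalizing pre with
  | nil => simp [pvMySplit]
  | cons c rest ih =>
    simp only [List.mem_cons, not_or] at h
    simp [pvMySplit, Ne.symm h.1, ih (pre ++ [c]) h.2]

lemma pvMySplitLast (pre xs ys : List Char) (h : '.' ∉ ys) :
    pvMySplit pre (xs ++ '.' :: ys) = pvMySplit pre xs ++ [ys] := by
  induction xs generalizing pre with
  | nil => simp [pvMySplit, pvMySplitNoDot [] ys h]
  | cons c rest ih =>
    by_cases hc : c = '.' <;> simp [pvMySplit, hc, ih]

lemma pvExistsLastDot : ∀ (p : List Char), '.' ∈ p → ∃ xs ys, p = xs ++ '.' :: ys ∧ '.' ∉ ys := by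
  intro p
  induction p using List.reverseRecOn with
  | nil => simp
  | append_singleton l c ih =>
    intro h
    by_cases hc : c = '.'
    · exact ⟨l, [], by simp [hc], by simp⟩
    · have hl : '.' ∈ l := by
        rcases List.mem_append.mp h with h' | h'
        · exact h'
        · exact absurd (List.mem_singleton.mp h').symm hc
      obtain ⟨xs, ys, rfl, hys⟩ := ih hl
      have hc2 : ¬('.' = c) := fun h' => hc h'.symm
      exact ⟨xs, ys ++ [c], by simp, by simp [hys, hc2]⟩

lemma pvCheckRevEq : ∀ (ls acc : List (List Char)),
    pvCheckRev ls acc = if ls.all (fun l => !pvBad l) then some (acc ++ ls) else none := by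
  intro ls
  induction ls with
  | nil => intro acc; simp [pvCheckRev]
  | cons l rest ih =>
    intro acc
    rw [pvCheckRev]
    by_cases hb : pvBad l = true
    · rw [if_pos ((pvBad_iff l).2 hb)]
      simp [hb]
    · have hb' : pvBad l = false := by simpa using hb
      rw [if_neg (fun hcon => hb ((pvBad_iff l).1 hcon)), ih]
      simp [hb']

lemma pvLoopAEq (cs : List Char) :
    ∀ (fuel : Nat) (p : List Char) (acc : List (List Char)), p <+: cs → p.length + 2 ≤ fuel →
      pvLoopA cs (p.length : Int) acc fuel =
        (if (pvMySplit [] p).all (fun l => !pvBad l) then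
          some (acc ++ (pvMySplit [] p).reverse) else none) := by
  intro fuel
  induction fuel with
  | zero => intro p acc _ hf; omega
  | succ fuel ih =>
    intro p acc hp hf
    simp only [pvLoopA]
    rw [if_pos (show (0 : Int) ≤ (p.length : Int) by omega)]
    rw [pvRfindFrom cs p hp]
    by_cases hd : '.' ∈ p
    · obtain ⟨xs, ys, hpe, hys⟩ := pvExistsLastDot p hd
      subst hpe
      rw [pvRfindLast xs ys hys]
      obtain ⟨rest, hrest⟩ := hp
      have hlabel : PySem.List.slice cs (some ((xs.length : Int) + 1))
          (some ((xs ++ '.' :: ys).length : Int)) = ys := by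
        have h1 : ((xs.length : Int) + 1) = ((xs.length + 1 : Nat) : Int) := by push_cast; ring
        rw [h1, PySem.List.slice_natCast, ← hrest]
        have h2 : (xs ++ '.' :: ys) ++ rest = (xs ++ ['.']) ++ (ys ++ rest) := by simp
        have h3 : xs.length + 1 = (xs ++ ['.']).length := by simp
        rw [h2, h3, List.drop_left]
        have h4 : (xs ++ '.' :: ys).length - (xs ++ ['.']).length = ys.length := by
          simp only [List.length_append, List.length_cons, List.length_nil]
          omega
        rw [h4, List.take_left]
      rw [hlabel]
      by_cases hb : pvBad ys = true
      · rw [if_pos ((pvBad_iff ys).2 hb)]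
        rw [pvMySplitLast [] xs ys hys]
        simp [hb]
      · have hb' : pvBad ys = false := by simpa using hb
        rw [if_neg (fun hcon => hb ((pvBad_iff ys).1 hcon))]
        have hxp : xs <+: cs := ⟨'.' :: ys ++ rest, by simp [← hrest]⟩
        have hfx : xs.length + 2 ≤ fuel := by
          have h5 : (xs ++ '.' :: ys).length = xs.length + 1 + ys.length := by
            simp only [List.length_append, List.length_cons]; omega
          omega
        rw [ih xs (acc ++ [ys]) hxp hfx, pvMySplitLast [] xs ys hys]
        simp [List.all_append, hb', List.reverse_append, List.append_assoc]
    · rw [pvRfindNo p hd]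
      rw [show ((-1 : Int) + 1) = 0 from by norm_num]
      have htake : cs.take p.length = p := (List.prefix_iff_eq_take.mp hp).symm
      have hlabel : PySem.List.slice cs (some (0 : Int)) (some (p.length : Int)) = p := by
        rw [PySem.List.slice_zero_start, PySem.List.slice_to_natCast, htake]
      rw [hlabel]
      have hms : pvMySplit [] p = [p] := by simpa using pvMySplitNoDot [] p hd
      by_cases hb : pvBad p = true
      · rw [if_pos ((pvBad_iff p).2 hb)]
        simp [hms, hb]
      · have hb' : pvBad p = false := by simpa using hb
        rw [if_neg (fun hcon => hb ((pvBad_iff p).1 hcon))]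
        obtain ⟨f, rfl⟩ : ∃ f, fuel = f + 1 := ⟨fuel - 1, by omega⟩
        rw [show pvLoopA cs (-1) (acc ++ [p]) (f + 1) = some (acc ++ [p]) from by simp [pvLoopA]]
        simp [hms, hb']

-- ===== VERDICT (by name: the statement is the Claim_ definition above) =====
theorem split_into_labels_spec : Claim_equal_split_into_labels := by
  intro domain _ hpre
  unfold Spec_split_into_labels split_into_labels split_into_labels_alt
  unfold Pre_split_into_labels at hpre
  by_cases he : PySem.Str.endswith domain "." = true
  · -- trailing dot: body = dropLast, tail = "."
    simp only [he, if_true] at hpre ⊢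
    rw [PySem.List.slice_to_neg_one]
    have hlen1 : 1 ≤ domain.toList.length := by
      rcases hq : domain.toList with _ | ⟨c, t⟩
      · exfalso
        have h1 : PySem.Chars.endswith domain.toList ['.'] = true := by
          have hdot : (".":String).toList = ['.'] := rfl
          simpa [PySem.Str.endswith, hdot] using he
        rw [hq] at h1
        simp [PySem.Chars.endswith, List.isSuffixOf] at h1
      · simp
    have hidx : ((domain.toList.length : Int) - 1) = ((domain.toList.dropLast.length : Nat) : Int) := by
      rw [List.length_dropLast]; omega
    by_cases hp0 : domain.toList.dropLast = []
    · have hlt : ¬ (0 < (domain.toList.length : Int) - 1) := by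
        have h3 : domain.toList.dropLast.length = 0 := by simp [hp0]
        rw [List.length_dropLast] at h3
        omega
      rw [if_neg hlt, if_pos hp0]
    · have hplen : 0 < (domain.toList.length : Int) - 1 := by
        have h3 : 0 < domain.toList.dropLast.length := List.length_pos_of_ne_nil hp0
        rw [List.length_dropLast] at h3
        omega
      rw [if_pos hplen, if_neg hp0, hidx]
      rw [pvLoopAEq domain.toList (domain.toList.length + 2) _ [] (List.dropLast_prefix _)
        (by rw [List.length_dropLast]; omega)]
      rcases hpre with h | h
      · exact absurd h hp0
      · have hall : (pvMySplit [] domain.toList.dropLast).all (fun l => !pvBad l) = true := by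
          rw [List.all_eq_true]
          intro l hl
          have hbl := h l (by rwa [pvSplitOnEq])
          simp [hbl]
        rw [pvSplitOnEq, pvCheckRevEq]
        simp [hall, List.all_reverse]
  · -- no trailing dot: body = the whole domain, tail = ""
    have he' : PySem.Str.endswith domain "." = false := by simpa using he
    simp only [he', Bool.false_eq_true, if_false] at hpre ⊢
    by_cases hp0 : domain.toList = []
    · have hlt : ¬ (0 < (domain.toList.length : Int)) := by simp [hp0]
      rw [if_neg hlt, if_pos hp0]
    · have hplen : 0 < (domain.toList.length : Int) := by
        have h3 := List.length_pos_of_ne_nil hp0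
        omega
      rw [if_pos hplen, if_neg hp0]
      rw [pvLoopAEq domain.toList (domain.toList.length + 2) _ [] (List.prefix_refl _) (by omega)]
      rcases hpre with h | h
      · exact absurd h hp0
      · have hall : (pvMySplit [] domain.toList).all (fun l => !pvBad l) = true := by
          rw [List.all_eq_true]
          intro l hl
          have hbl := h l (by rwa [pvSplitOnEq])
          simp [hbl]
        rw [pvSplitOnEq, pvCheckRevEq]
        simp [hall, List.all_reverse]
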